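-- pv_equiv track=rewrite | github.com/Healura/user_management | scripts/health_check.py | _generate_health_summary
-- ===== SOURCE A (Python) =====
-- from typing import Dict, List, Optional, Any, Tuple
--
-- def _generate_health_summary(checks: Dict[str, Any]) -> Dict[str, Any]:
--     """Generate health summary."""
--     summary = {
--         "total_components": len(checks),
--         "healthy_components": 0,
--         "warning_components": 0,
--         "critical_components": 0,
--         "error_components": 0
--     }
--
--     for component, check_result in checks.items():
--         status = check_result.get("status", "error")
--
--         if status == "healthy":
--             summary["healthy_components"] += 1
--         elif status == "warning":
--             summary["warning_components"] += 1
--         elif status == "critical":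
--             summary["critical_components"] += 1
--         else:
--             summary["error_components"] += 1
--
--     return summary
-- ===== SOURCE B (Python) =====
-- def _generate_health_summary(checks):
--     """Generate health summary."""
--     statuses = [check_result.get("status", "error") for check_result in checks.values()]
--     total = len(checks)
--     healthy = statuses.count("healthy")
--     warning = statuses.count("warning")
--     critical = statuses.count("critical")
--     return {
--         "total_components": total,
--         "healthy_components": healthy,
--         "warning_components": warning,
--         "critical_components": critical,
--         "error_components": total - healthy - warning - critical,
--     }
-- ===== Notes on version B (the rewrite author's own statement) =====
-- stated objective: idiomatic
-- what changed: B materialises the status list once and tabulates with list.count, deriving the error bucket as total minus the three known counts, instead of A's per-element if/elif accumulator loop.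
import Mathlib
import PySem

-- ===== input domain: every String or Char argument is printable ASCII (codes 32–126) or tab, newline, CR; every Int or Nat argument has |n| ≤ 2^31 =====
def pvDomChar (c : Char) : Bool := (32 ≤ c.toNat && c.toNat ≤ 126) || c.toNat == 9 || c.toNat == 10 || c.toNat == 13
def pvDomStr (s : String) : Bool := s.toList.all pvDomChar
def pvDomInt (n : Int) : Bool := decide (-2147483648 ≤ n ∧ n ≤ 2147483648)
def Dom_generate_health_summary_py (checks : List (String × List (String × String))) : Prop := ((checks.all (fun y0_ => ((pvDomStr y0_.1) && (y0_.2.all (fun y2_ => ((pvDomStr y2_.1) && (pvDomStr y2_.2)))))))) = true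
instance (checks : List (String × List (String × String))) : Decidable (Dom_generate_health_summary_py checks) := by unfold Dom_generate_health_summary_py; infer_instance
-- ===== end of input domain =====

-- B replaces A's if/elif accumulator loop by tabulating statuses with list.count and deriving
-- the error bucket by subtraction (idiomatic; return value only, no mutation involved).

-- check_result.get("status", "error") : first-match lookup on the association list
def pvStatusOf (cr : List (String × String)) : String :=
  (PySem.Dict.mk cr).getD "status" "error"

-- the body of A's for-loop
def pvStepA (s : PySem.Dict String Int) (kv : String × List (String × String)) : PySem.Dict String Int :=
  let status := pvStatusOf kv.2
  if status = "healthy" then s.modify "healthy_components" 0 (· + 1)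
  else if status = "warning" then s.modify "warning_components" 0 (· + 1)
  else if status = "critical" then s.modify "critical_components" 0 (· + 1)
  else s.modify "error_components" 0 (· + 1)

-- ===== PORT A =====
def generate_health_summary_py (checks : List (String × List (String × String))) : List (String × Int) :=
  let summary : PySem.Dict String Int := PySem.Dict.mk
    [("total_components", (checks.length : Int)),
     ("healthy_components", 0), ("warning_components", 0),
     ("critical_components", 0), ("error_components", 0)]
  let summary := checks.foldl pvStepA summary
  summary.items

-- ===== PORT B =====
def generate_health_summary_py_alt (checks : List (String × List (String × String))) : List (String × Int) :=
  let statuses := checks.map (fun kv => pvStatusOf kv.2)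
  let total : Int := checks.length
  let healthy : Int := statuses.count "healthy"
  let warning : Int := statuses.count "warning"
  let critical : Int := statuses.count "critical"
  [("total_components", total),
   ("healthy_components", healthy),
   ("warning_components", warning),
   ("critical_components", critical),
   ("error_components", total - healthy - warning - critical)]

-- ===== PRECONDITION & SPEC =====
def Spec_generate_health_summary_py (checks : List (String × List (String × String))) (out : List (String × Int)) : Prop := out = generate_health_summary_py_alt checks
instance (checks : List (String × List (String × String))) (out : List (String × Int)) : Decidable (Spec_generate_health_summary_py checks out) := by unfold Spec_generate_health_summary_py; infer_instance

-- ===== CLAIM (what is proved, stated in full; the proofs are below) =====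
def Claim_equal_generate_health_summary_py : Prop := ∀ (checks : List (String × List (String × String))), Dom_generate_health_summary_py checks → Spec_generate_health_summary_py checks (generate_health_summary_py checks)

-- ===== LEMMAS AND PROOFS =====

def pvIsOther (s : String) : Bool := !(s == "healthy" || s == "warning" || s == "critical")

-- A's loop, from a generalised summary dict: each bucket grows by the number of matching statuses.
lemma pv_fold_items (checks : List (String × List (String × String))) (n h w c e : Int) :
    (checks.foldl pvStepA
      (PySem.Dict.mk
        [("total_components", n), ("healthy_components", h), ("warning_components", w),
         ("critical_components", c), ("error_components", e)])) =
    PySem.Dict.mk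
      [("total_components", n),
       ("healthy_components", h + ((checks.map (fun kv => pvStatusOf kv.2)).count "healthy" : Int)),
       ("warning_components", w + ((checks.map (fun kv => pvStatusOf kv.2)).count "warning" : Int)),
       ("critical_components", c + ((checks.map (fun kv => pvStatusOf kv.2)).count "critical" : Int)),
       ("error_components", e + ((checks.map (fun kv => pvStatusOf kv.2)).countP pvIsOther : Int))] := by
  induction checks generalizing h w c e with
  | nil => simp [List.count]
  | cons kv rest ih =>
    rw [List.foldl_cons]
    by_cases h1 : pvStatusOf kv.2 = "healthy"
    · have hstep : pvStepA (PySem.Dict.mk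
          [("total_components", n), ("healthy_components", h), ("warning_components", w),
           ("critical_components", c), ("error_components", e)]) kv =
        PySem.Dict.mk
          [("total_components", n), ("healthy_components", h + 1), ("warning_components", w),
           ("critical_components", c), ("error_components", e)] := by
        simp [pvStepA, h1, PySem.Dict.modify, PySem.Dict.contains, PySem.Dict.getD,
              PySem.Dict.get?, PySem.Dict.insert]
      rw [hstep, ih]
      refine congrArg PySem.Dict.mk ?_
      simp [pvIsOther, h1]
      omega
    · by_cases h2 : pvStatusOf kv.2 = "warning"
      · have hstep : pvStepA (PySem.Dict.mk
            [("total_components", n), ("healthy_components", h), ("warning_components", w),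
             ("critical_components", c), ("error_components", e)]) kv =
          PySem.Dict.mk
            [("total_components", n), ("healthy_components", h), ("warning_components", w + 1),
             ("critical_components", c), ("error_components", e)] := by
          simp [pvStepA, h2, PySem.Dict.modify, PySem.Dict.contains, PySem.Dict.getD,
                PySem.Dict.get?, PySem.Dict.insert]
        rw [hstep, ih]
        refine congrArg PySem.Dict.mk ?_
        simp [pvIsOther, h2]
        omega
      · by_cases h3 : pvStatusOf kv.2 = "critical"
        · have hstep : pvStepA (PySem.Dict.mk
              [("total_components", n), ("healthy_components", h), ("warning_components", w),
               ("critical_components", c), ("error_components", e)]) kv =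
            PySem.Dict.mk
              [("total_components", n), ("healthy_components", h), ("warning_components", w),
               ("critical_components", c + 1), ("error_components", e)] := by
            simp [pvStepA, h3, PySem.Dict.modify, PySem.Dict.contains, PySem.Dict.getD,
                  PySem.Dict.get?, PySem.Dict.insert]
          rw [hstep, ih]
          refine congrArg PySem.Dict.mk ?_
          simp [pvIsOther, h3]
          omega
        · have hstep : pvStepA (PySem.Dict.mk
              [("total_components", n), ("healthy_components", h), ("warning_components", w),
               ("critical_components", c), ("error_components", e)]) kv =
            PySem.Dict.mk
              [("total_components", n), ("healthy_components", h), ("warning_components", w),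
               ("critical_components", c), ("error_components", e + 1)] := by
            simp [pvStepA, h1, h2, h3, PySem.Dict.modify, PySem.Dict.contains, PySem.Dict.getD,
                  PySem.Dict.get?, PySem.Dict.insert]
          rw [hstep, ih]
          refine congrArg PySem.Dict.mk ?_
          simp [pvIsOther, h1, h2, h3]
          omega

-- every status falls in exactly one bucket
lemma pv_length_split (l : List String) :
    (l.length : Int) = l.count "healthy" + l.count "warning" + l.count "critical" +
      l.countP pvIsOther := by
  induction l with
  | nil => simp
  | cons x xs ih =>
    simp only [List.length_cons, List.count_cons, List.countP_cons]
    by_cases h1 : x = "healthy"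
    · simp [pvIsOther, h1]; omega
    · by_cases h2 : x = "warning"
      · simp [pvIsOther, h2]; omega
      · by_cases h3 : x = "critical"
        · simp [pvIsOther, h3]; omega
        · simp [pvIsOther, h1, h2, h3]; omega

-- ===== VERDICT (by name: the statement is the Claim_ definition above) =====
theorem generate_health_summary_py_spec : Claim_equal_generate_health_summary_py := by
  intro checks _
  unfold Spec_generate_health_summary_py generate_health_summary_py generate_health_summary_py_alt
  simp only [pv_fold_items, zero_add]
  have := pv_length_split (checks.map (fun kv => pvStatusOf kv.2))
  simp only [List.length_map] at this
  simp only [List.cons.injEq, Prod.mk.injEq, and_true, true_and]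
  omega
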